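-- pv_equiv track=rewrite | github.com/GizawAAiT/Competitive_programming | codeforces/C_Verse_For_Santa.py | solve
-- ===== SOURCE A (Python) =====
-- import heapq
--
-- def solve(a, s, n):
--     h = []
--     i = 0
--     while i < n:
--         heapq.heappush(h, (-a[i], i))
--         s -= a[i]
--         if s < 0:
--             val, indx = heapq.heappop(h)
--             return indx + 1 if (val != a[i]) else 0
--         i += 1
--     return 0
-- ===== SOURCE B (Python) =====
-- def solve(a, s, n):
--     total = 0
--     mx = None
--     mi = -1
--     for i, x in enumerate(a):
--         if i >= n:
--             break
--         total += x
--         if mx is None or x > mx: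
--             mx, mi = x, i
--         if total > s:
--             return mi + 1
--     return 0
-- ===== Notes on version B (the rewrite author's own statement) =====
-- stated objective: faster
-- what changed: Replaces the heap of negated (value,index) pairs (a heappush per element plus a pop) with a single pass that tracks the running sum and the running maximum with its earliest index, and at the first over-budget position always returns that index.
-- intended difference: On inputs whose first over-budget element a[i] equals the NEGATED prefix maximum (only possible for non-positive break elements, e.g. ([0], -1, 1)), A returns 0 because its comparison `val != a[i]` tests a[i] against the heap key val = -max instead of the maximum itself (a sign slip, unreachable for the contest's positive verse lengths), while B returns the earliest maximum's 1-based index, the verse to skip, which is what the function computes everywhere else. — e.g. on solve([0], -1, 1): A returns 0, B returns 1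
import Mathlib
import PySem

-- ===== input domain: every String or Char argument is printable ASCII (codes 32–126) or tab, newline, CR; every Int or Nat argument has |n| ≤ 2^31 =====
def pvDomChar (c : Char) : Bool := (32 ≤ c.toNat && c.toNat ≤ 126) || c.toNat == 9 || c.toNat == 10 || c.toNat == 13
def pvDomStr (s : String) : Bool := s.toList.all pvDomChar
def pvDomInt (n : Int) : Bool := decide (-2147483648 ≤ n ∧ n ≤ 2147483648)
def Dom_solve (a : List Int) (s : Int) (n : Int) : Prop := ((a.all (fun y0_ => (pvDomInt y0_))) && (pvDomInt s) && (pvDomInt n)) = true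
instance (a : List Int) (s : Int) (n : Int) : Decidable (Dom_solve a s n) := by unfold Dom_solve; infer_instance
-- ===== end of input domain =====

-- B replaces A's heap of negated (value, index) pairs by a single pass tracking the running
-- maximum and its earliest index, and at the break always returns that index (see D_solve).

-- ===== PORT A =====
-- Python tuple comparison (-a[i], i): lexicographic order on Int × Int.
def pvLexLt (p q : Int × Int) : Bool := p.1 < q.1 || (p.1 == q.1 && p.2 < q.2)

-- heapq.heappop returns the unique smallest element of the heap's contents; heappush appends.
-- This models exactly the observable behaviour of the heapq calls A makes (one pop, then return).
def pvHeapMin? (h : List (Int × Int)) : Option (Int × Int) :=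
  h.foldl (fun m x => match m with
    | none => some x
    | some q => if pvLexLt x q then some x else some q) none

-- the while loop: fuel = number of remaining permitted iterations (loop runs at most n times)
def pvSolveGo (a : List Int) (n : Int) : Nat → Nat → List (Int × Int) → Int → Int
  | 0, _, _, _ => 0
  | fuel+1, i, h, s =>
    if (i : Int) < n then
      match PySem.List.pyGet? a (i : Int) with
      | none => 0      -- Python raises IndexError here; excluded by Pre_solve
      | some ai =>
        let h' := h ++ [(-ai, (i : Int))]
        let s' := s - ai
        if s' < 0 then
          match pvHeapMin? h' with
          | none => 0   -- unreachable: h' is nonempty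
          | some (val, indx) => if val ≠ ai then indx + 1 else 0
        else pvSolveGo a n fuel (i+1) h' s'
    else 0

def solve (a : List Int) (s : Int) (n : Int) : Int :=
  pvSolveGo a n (n.toNat + 1) 0 [] s

-- ===== PORT B =====
-- single pass: total = running sum, mxo = running max (None before the first element),
-- mi = earliest index of the max; `for i, x in enumerate(a): if i >= n: break; ...`
def pvAltGo (s n : Int) : List Int → Nat → Int → Option Int → Int → Int
  | [], _, _, _, _ => 0
  | x :: rest, i, total, mxo, mi =>
    if n ≤ (i : Int) then 0
    else
      let total' := total + x
      let p : Int × Int :=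
        match mxo with
        | none => (x, (i : Int))
        | some m => if m < x then (x, (i : Int)) else (m, mi)
      if s < total' then p.2 + 1
      else pvAltGo s n rest (i+1) total' (some p.1) p.2

def solve_alt (a : List Int) (s : Int) (n : Int) : Int :=
  pvAltGo s n a 0 0 none (-1)

-- ===== PRECONDITION & SPEC =====
-- Pre_solve excludes exactly the inputs where Python A raises IndexError: the loop bound n
-- exceeds len(a) and the running sum never exceeds s within the list, so a[len(a)] is read.
def Pre_solve (a : List Int) (s : Int) (n : Int) : Prop :=
  n ≤ (a.length : Int) ∨ ∃ i < a.length, s < (a.take (i+1)).sum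
instance (a : List Int) (s : Int) (n : Int) : Decidable (Pre_solve a s n) := by
  unfold Pre_solve; infer_instance
def pvWitness_solve : List Int × Int × Int := ([1], 0, 1)

-- On inputs whose first over-budget position i (within the first n elements) carries an element
-- equal to the NEGATED prefix maximum, A returns 0 — its comparison `val != a[i]` tests a[i]
-- against the heap key val = -max instead of the maximum itself (a sign slip, unreachable for the
-- contest's positive inputs) — while B returns the earliest maximum's 1-based index, the verse to
-- skip, which is what the function is for.
def D_solve (a : List Int) (s : Int) (n : Int) : Prop :=
  ∃ i < a.length, (i : Int) < n ∧ s < (a.take (i+1)).sum ∧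
    (∀ j < i, (a.take (j+1)).sum ≤ s) ∧ (a.take (i+1)).max? = some (-(a.getD i 0))
instance (a : List Int) (s : Int) (n : Int) : Decidable (D_solve a s n) := by
  unfold D_solve; infer_instance

def Spec_solve (a : List Int) (s : Int) (n : Int) (out : Int) : Prop :=
  ¬ D_solve a s n → out = solve_alt a s n
instance (a : List Int) (s : Int) (n : Int) (out : Int) : Decidable (Spec_solve a s n out) := by
  unfold Spec_solve; infer_instance

def pvDiffWitness_solve : List Int × Int × Int := ([0], -1, 1)
def pvDiffWitnessOut_solve : Int × Int := (0, 1)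

-- ===== CLAIM (what is proved, stated in full; the proofs are below) =====
def Claim_unchanged_solve : Prop := ∀ (a : List Int) (s : Int) (n : Int), Dom_solve a s n → Pre_solve a s n → Spec_solve a s n (solve a s n)
def Claim_changed_solve : Prop := Dom_solve (pvDiffWitness_solve.1) (pvDiffWitness_solve.2.1) (pvDiffWitness_solve.2.2) ∧ Pre_solve (pvDiffWitness_solve.1) (pvDiffWitness_solve.2.1) (pvDiffWitness_solve.2.2) ∧ D_solve (pvDiffWitness_solve.1) (pvDiffWitness_solve.2.1) (pvDiffWitness_solve.2.2) ∧ solve (pvDiffWitness_solve.1) (pvDiffWitness_solve.2.1) (pvDiffWitness_solve.2.2) = pvDiffWitnessOut_solve.1 ∧ solve_alt (pvDiffWitness_solve.1) (pvDiffWitness_solve.2.1) (pvDiffWitness_solve.2.2) = pvDiffWitnessOut_solve.2 ∧ pvDiffWitnessOut_solve.1 ≠ pvDiffWitnessOut_solve.2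
def Claim_exact_solve : Prop := ∀ (a : List Int) (s : Int) (n : Int), Dom_solve a s n → Pre_solve a s n → D_solve a s n → solve a s n ≠ solve_alt a s n

-- ===== LEMMAS AND PROOFS =====

-- max? of a list with one element appended
lemma pvMax?_concat (l : List Int) (x : Int) :
    (l ++ [x]).max? = some (match l.max? with | none => x | some m => max m x) := by
  cases l with
  | nil => simp [List.max?]
  | cons y ys => simp [List.max?, List.foldl_append]

lemma pvHeapMin?_concat (h : List (Int × Int)) (p : Int × Int) :
    pvHeapMin? (h ++ [p]) =
      (match pvHeapMin? h with
       | none => some p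
       | some q => if pvLexLt p q then some p else some q) := by
  simp [pvHeapMin?, List.foldl_append]

-- the coupled-loop correspondence, outside the change region D_solve
lemma pvLoopEq (a : List Int) (s n : Int) (hD : ¬ D_solve a s n) :
    ∀ (rest : List Int) (i fuel : Nat) (total : Int) (h : List (Int × Int))
      (mxo : Option Int) (mi : Int),
      rest = a.drop i →
      n ≤ (i : Int) + (fuel : Int) →
      total = (a.take i).sum →
      (∀ j < i, (a.take (j+1)).sum ≤ s) →
      ((i = 0 ∧ h = [] ∧ mxo = none) ∨
        (∃ m, mxo = some m ∧ pvHeapMin? h = some (-m, mi) ∧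
          (a.take i).max? = some m ∧ 0 ≤ mi ∧ mi < (i : Int))) →
      pvSolveGo a n fuel i h (s - total) = pvAltGo s n rest i total mxo mi := by
  intro rest
  induction rest with
  | nil =>
    intro i fuel total h mxo mi hrest hfuel htot hnb hinv
    have hlen : a.length ≤ i := by
      by_contra hlt
      have := List.drop_eq_nil_iff.mp hrest.symm
      omega
    cases fuel with
    | zero => simp [pvSolveGo, pvAltGo]
    | succ f =>
      simp only [pvSolveGo, pvAltGo]
      split
      · rw [PySem.List.pyGet?_natCast, List.getElem?_eq_none hlen]
      · rfl
  | cons x rest' ih =>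
    intro i fuel total h mxo mi hrest hfuel htot hnb hinv
    have hi : i < a.length := by
      by_contra hge
      rw [List.drop_eq_nil_iff.mpr (by omega)] at hrest
      simp at hrest
    rw [List.drop_eq_getElem_cons hi] at hrest
    obtain ⟨hxval, hrest'⟩ := List.cons_eq_cons.mp hrest
    have hx : a[i]? = some x := by rw [hxval]; exact List.getElem?_eq_getElem hi
    by_cases hin : (i : Int) < n
    · cases fuel with
      | zero => exfalso; omega
      | succ f =>
        have htake : a.take (i+1) = a.take i ++ [x] := by
          rw [List.take_add_one, hx]; rfl
        have hsum : (a.take (i+1)).sum = total + x := by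
          rw [htake, List.sum_append, htot]; simp
        have hgd : a.getD i 0 = x := by
          rw [List.getD_eq_getElem?_getD, hx]; rfl
        simp only [pvSolveGo, if_pos hin, PySem.List.pyGet?_natCast, hx,
          pvAltGo, if_neg (not_le.mpr hin)]
        rcases hinv with ⟨hi0, hh, hmx⟩ | ⟨m, hmx, hmin, hmax, hmi0, hmil⟩
        · -- i = 0 : the heap and the running max are both empty
          subst hh hmx
          have hmin' : pvHeapMin? ([] ++ [(-x, (i : Int))]) = some (-x, (i : Int)) := by
            simp [pvHeapMin?]
          have hmax' : (a.take (i+1)).max? = some x := by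
            rw [htake, hi0]
            simp [List.max?]
          by_cases hbr : s < total + x
          · have hnd : (a.take (i+1)).max? ≠ some (-(a.getD i 0)) := fun hmaxeq =>
              hD ⟨i, hi, hin, hsum ▸ hbr, hnb, hmaxeq⟩
            rw [hmax', hgd] at hnd
            have hxne : ¬ (-x = x) := fun hc => hnd (congrArg some hc.symm)
            rw [if_pos (show s - total - x < 0 by omega), hmin', if_pos hbr]
            simp [hxne]
          · rw [if_neg (show ¬ s - total - x < 0 by omega), if_neg hbr]
            have hrec := ih (i+1) f (total + x) ([] ++ [(-x, (i : Int))]) (some x) (i : Int)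
              hrest'
              (by push_cast at hfuel ⊢; omega)
              hsum.symm
              (by intro j hj
                  rcases Nat.lt_succ_iff_lt_or_eq.mp hj with hj' | hj'
                  · exact hnb j hj'
                  · subst hj'; omega)
              (Or.inr ⟨x, rfl, hmin', hmax', by omega, by push_cast; omega⟩)
            rw [show s - total - x = s - (total + x) by ring]
            exact hrec
        · -- i > 0 : heap min is (-m, mi), running max is m
          subst hmx
          have hp1 : (if m < x then ((x : Int), (i : Int)) else (m, mi)).1
              = if m < x then x else m := by split <;> rfl
          have hp2 : (if m < x then ((x : Int), (i : Int)) else (m, mi)).2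
              = if m < x then (i : Int) else mi := by split <;> rfl
          have hmin' : pvHeapMin? (h ++ [(-x, (i : Int))]) =
              some (-(if m < x then x else m), if m < x then (i : Int) else mi) := by
            by_cases hc : m < x
            · have hlex : pvLexLt (-x, (i : Int)) (-m, mi) = true := by
                simp [pvLexLt]; omega
              simp [pvHeapMin?_concat, hmin, hlex, hc]
            · have hlex : pvLexLt (-x, (i : Int)) (-m, mi) = false := by
                simp [pvLexLt]; omega
              simp [pvHeapMin?_concat, hmin, hlex, hc]
          have hmax' : (a.take (i+1)).max? = some (max m x) := by
            rw [htake, pvMax?_concat, hmax]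
          have hpmax : (if m < x then x else m) = max m x := by
            split <;> omega
          by_cases hbr : s < total + x
          · have hnd : (a.take (i+1)).max? ≠ some (-(a.getD i 0)) := fun hmaxeq =>
              hD ⟨i, hi, hin, hsum ▸ hbr, hnb, hmaxeq⟩
            rw [hmax', hgd] at hnd
            have hxne : ¬ (-(if m < x then x else m) = x) := by
              rw [hpmax]
              intro hc
              exact hnd (congrArg some (by omega))
            rw [if_pos (show s - total - x < 0 by omega), hmin', if_pos hbr]
            simp [hxne, hp2]
          · rw [if_neg (show ¬ s - total - x < 0 by omega), if_neg hbr]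
            have hrec := ih (i+1) f (total + x) (h ++ [(-x, (i : Int))])
              (some (if m < x then x else m)) (if m < x then (i : Int) else mi)
              hrest'
              (by push_cast at hfuel ⊢; omega)
              hsum.symm
              (by intro j hj
                  rcases Nat.lt_succ_iff_lt_or_eq.mp hj with hj' | hj'
                  · exact hnb j hj'
                  · subst hj'; omega)
              (Or.inr ⟨if m < x then x else m, rfl, hmin',
                by rw [hpmax]; exact hmax',
                by split <;> omega,
                by split <;> (push_cast; omega)⟩)
            rw [show s - total - x = s - (total + x) by ring]
            rw [hp1, hp2]
            exact hrec
    · cases fuel with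
      | zero =>
        simp [pvSolveGo, pvAltGo, if_pos (not_lt.mp hin)]
      | succ f =>
        simp [pvSolveGo, pvAltGo, if_neg hin, if_pos (not_lt.mp hin)]

-- at the first over-budget position of an input inside D_solve, A returns 0 and B returns ≥ 1
lemma pvLoopBreak (a : List Int) (s n : Int) (k : Nat) (hk : k < a.length)
    (hkn : (k : Int) < n) (hbrk : s < (a.take (k+1)).sum)
    (hfb : ∀ j < k, (a.take (j+1)).sum ≤ s)
    (hmaxk : (a.take (k+1)).max? = some (-(a.getD k 0))) :
    ∀ (rest : List Int) (i fuel : Nat) (total : Int) (h : List (Int × Int))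
      (mxo : Option Int) (mi : Int),
      rest = a.drop i →
      i ≤ k →
      n ≤ (i : Int) + (fuel : Int) →
      total = (a.take i).sum →
      ((i = 0 ∧ h = [] ∧ mxo = none) ∨
        (∃ m, mxo = some m ∧ pvHeapMin? h = some (-m, mi) ∧
          (a.take i).max? = some m ∧ 0 ≤ mi ∧ mi < (i : Int))) →
      pvSolveGo a n fuel i h (s - total) = 0 ∧ 1 ≤ pvAltGo s n rest i total mxo mi := by
  intro rest
  induction rest with
  | nil =>
    intro i fuel total h mxo mi hrest hik hfuel htot hinv
    exfalso
    have := List.drop_eq_nil_iff.mp hrest.symm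
    omega
  | cons x rest' ih =>
    intro i fuel total h mxo mi hrest hik hfuel htot hinv
    have hi : i < a.length := by omega
    rw [List.drop_eq_getElem_cons hi] at hrest
    obtain ⟨hxval, hrest'⟩ := List.cons_eq_cons.mp hrest
    have hx : a[i]? = some x := by rw [hxval]; exact List.getElem?_eq_getElem hi
    have hin : (i : Int) < n := by
      have : (i : Int) ≤ (k : Int) := by exact_mod_cast hik
      omega
    cases fuel with
    | zero => exfalso; omega
    | succ f =>
      have htake : a.take (i+1) = a.take i ++ [x] := by
        rw [List.take_add_one, hx]; rfl
      have hsum : (a.take (i+1)).sum = total + x := by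
        rw [htake, List.sum_append, htot]; simp
      have hgd : a.getD i 0 = x := by
        rw [List.getD_eq_getElem?_getD, hx]; rfl
      simp only [pvSolveGo, if_pos hin, PySem.List.pyGet?_natCast, hx,
        pvAltGo, if_neg (not_le.mpr hin)]
      rcases hinv with ⟨hi0, hh, hmx⟩ | ⟨m, hmx, hmin, hmax, hmi0, hmil⟩
      · -- i = 0
        subst hh hmx
        have hmin' : pvHeapMin? ([] ++ [(-x, (i : Int))]) = some (-x, (i : Int)) := by
          simp [pvHeapMin?]
        have hmax' : (a.take (i+1)).max? = some x := by
          rw [htake, hi0]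
          simp [List.max?]
        by_cases hieq : i = k
        · have hbr : s < total + x := by rw [← hsum, hieq]; exact hbrk
          have hxeq : -x = x := by
            rw [hieq] at hmax' hgd
            rw [hmax', hgd] at hmaxk
            have := Option.some.inj hmaxk
            omega
          rw [if_pos (show s - total - x < 0 by omega), hmin', if_pos hbr]
          exact ⟨by simp [hxeq], by simp⟩
        · have hbr : ¬ s < total + x := by rw [← hsum]; exact not_lt.mpr (hfb i (by omega))
          rw [if_neg (show ¬ s - total - x < 0 by omega), if_neg hbr]
          have hrec := ih (i+1) f (total + x) ([] ++ [(-x, (i : Int))]) (some x) (i : Int)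
            hrest' (by omega) (by push_cast at hfuel ⊢; omega) hsum.symm
            (Or.inr ⟨x, rfl, hmin', hmax', by omega, by push_cast; omega⟩)
          rw [show s - total - x = s - (total + x) by ring]
          exact hrec
      · -- i > 0
        subst hmx
        have hp1 : (if m < x then ((x : Int), (i : Int)) else (m, mi)).1
            = if m < x then x else m := by split <;> rfl
        have hp2 : (if m < x then ((x : Int), (i : Int)) else (m, mi)).2
            = if m < x then (i : Int) else mi := by split <;> rfl
        have hmin' : pvHeapMin? (h ++ [(-x, (i : Int))]) =
            some (-(if m < x then x else m), if m < x then (i : Int) else mi) := by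
          by_cases hc : m < x
          · have hlex : pvLexLt (-x, (i : Int)) (-m, mi) = true := by
              simp [pvLexLt]; omega
            simp [pvHeapMin?_concat, hmin, hlex, hc]
          · have hlex : pvLexLt (-x, (i : Int)) (-m, mi) = false := by
              simp [pvLexLt]; omega
            simp [pvHeapMin?_concat, hmin, hlex, hc]
        have hmax' : (a.take (i+1)).max? = some (max m x) := by
          rw [htake, pvMax?_concat, hmax]
        by_cases hieq : i = k
        · have hbr : s < total + x := by rw [← hsum, hieq]; exact hbrk
          have hxeq : -(if m < x then x else m) = x := by
            rw [hieq] at hmax' hgd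
            rw [hmax', hgd] at hmaxk
            have := Option.some.inj hmaxk
            split <;> omega
          rw [if_pos (show s - total - x < 0 by omega), hmin', if_pos hbr]
          refine ⟨by simp [hxeq], ?_⟩
          simp only [hp2]
          split <;> omega
        · have hbr : ¬ s < total + x := by rw [← hsum]; exact not_lt.mpr (hfb i (by omega))
          rw [if_neg (show ¬ s - total - x < 0 by omega), if_neg hbr]
          have hrec := ih (i+1) f (total + x) (h ++ [(-x, (i : Int))])
            (some (if m < x then x else m)) (if m < x then (i : Int) else mi)
            hrest' (by omega) (by push_cast at hfuel ⊢; omega) hsum.symm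
            (Or.inr ⟨if m < x then x else m, rfl, hmin',
              by rw [show (if m < x then x else m) = max m x by split <;> omega]; exact hmax',
              by split <;> omega,
              by split <;> (push_cast; omega)⟩)
          rw [show s - total - x = s - (total + x) by ring]
          rw [hp1, hp2]
          exact hrec

theorem solve_spec : Claim_unchanged_solve := by
  intro a s n _hDom _hPre hD
  show solve a s n = solve_alt a s n
  unfold solve solve_alt
  have hrec := pvLoopEq a s n hD a 0 (n.toNat + 1) 0 [] none (-1) rfl
    (by push_cast; omega) (by simp) (fun j hj => absurd hj (Nat.not_lt_zero j))
    (Or.inl ⟨rfl, rfl, rfl⟩)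
  rw [sub_zero] at hrec
  exact hrec

theorem solve_changed : Claim_changed_solve := by unfold Claim_changed_solve; decide

theorem solve_tight : Claim_exact_solve := by
  intro a s n _hDom _hPre hD
  obtain ⟨k, hk, hkn, hbrk, hfb, hmaxk⟩ := hD
  have hrec := pvLoopBreak a s n k hk hkn hbrk hfb hmaxk a 0 (n.toNat + 1) 0 [] none (-1)
    rfl (Nat.zero_le k) (by push_cast; omega) (by simp) (Or.inl ⟨rfl, rfl, rfl⟩)
  rw [sub_zero] at hrec
  unfold solve solve_alt
  omega
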